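-- pv_equiv track=rewrite | github.com/m10singh94/Python-programs | count_dict_difference.py | count_dict_difference
-- ===== SOURCE A (Python) =====
-- def count_dict_difference(A, B):
--     result_dict = {}
--     for key in A.keys():
--         if key in B.keys():
--             if A[key] - B[key] > 0:
--                 result_dict[key] = A[key] - B[key]
--         else:
--             result_dict[key] = A[key]
--     return result_dict
-- ===== SOURCE B (Python) =====
-- def count_dict_difference(A, B):
--     # set algebra picks the kept keys up front; then one uniform subtraction pass in A's order
--     shared = A.keys() & B.keys()
--     keep = (A.keys() - B.keys()) | {k for k in shared if A[k] > B[k]}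
--     return {k: A[k] - B.get(k, 0) for k in A if k in keep}
-- ===== Notes on version B (the rewrite author's own statement) =====
-- stated objective: alternative
-- what changed: A's single interleaved loop whose body branches on membership and conditionally inserts is replaced by set algebra computed up front -- keep = (A.keys() - B.keys()) | {k in A.keys() & B.keys() with A[k] > B[k]} -- followed by one uniform branch-free subtraction pass over A's keys using B.get(k, 0); Pre_ only excludes association lists whose A-side keys repeat, which never arise from a Python dict.
import Mathlib
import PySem

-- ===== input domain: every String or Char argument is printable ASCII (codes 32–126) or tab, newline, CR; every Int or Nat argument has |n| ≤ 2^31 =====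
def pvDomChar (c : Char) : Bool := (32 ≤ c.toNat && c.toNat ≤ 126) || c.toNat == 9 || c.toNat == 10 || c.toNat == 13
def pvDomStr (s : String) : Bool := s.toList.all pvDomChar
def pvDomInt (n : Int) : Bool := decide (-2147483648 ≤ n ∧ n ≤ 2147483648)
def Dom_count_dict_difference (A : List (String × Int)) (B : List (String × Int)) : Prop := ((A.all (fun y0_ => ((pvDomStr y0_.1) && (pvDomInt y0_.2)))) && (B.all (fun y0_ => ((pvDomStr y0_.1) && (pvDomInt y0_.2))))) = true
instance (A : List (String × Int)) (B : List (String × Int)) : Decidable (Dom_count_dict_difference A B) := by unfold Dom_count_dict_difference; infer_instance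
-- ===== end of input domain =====

-- B replaces A's interleaved membership-branching loop by set algebra computed up front (the
-- kept key set) followed by one uniform subtraction pass in A's key order; objective: alternative.

-- ===== PORT A =====
def count_dict_difference (A : List (String × Int)) (B : List (String × Int)) : List (String × Int) :=
  let Ad : PySem.Dict String Int := PySem.Dict.mk A
  let Bd : PySem.Dict String Int := PySem.Dict.mk B
  (Ad.keys.foldl (fun r key =>
      if Bd.contains key then
        if Ad.getD key 0 - Bd.getD key 0 > 0 then
          r.insert key (Ad.getD key 0 - Bd.getD key 0)
        else r
      else
        r.insert key (Ad.getD key 0)) PySem.Dict.empty).items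

-- ===== PORT B =====
def count_dict_difference_alt (A : List (String × Int)) (B : List (String × Int)) : List (String × Int) :=
  let Ad : PySem.Dict String Int := PySem.Dict.mk A
  let Bd : PySem.Dict String Int := PySem.Dict.mk B
  -- shared = A.keys() & B.keys()
  let shared : PySem.Set String := PySem.Set.inter (PySem.Set.ofList Ad.keys) Bd.keys
  -- keep = (A.keys() - B.keys()) | {k for k in shared if A[k] > B[k]}   (only membership of these sets is consumed)
  let keep : PySem.Set String :=
    PySem.Set.union (PySem.Set.diff (PySem.Set.ofList Ad.keys) Bd.keys)
      (shared.filter (fun k => Ad.getD k 0 > Bd.getD k 0))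
  -- {k: A[k] - B.get(k, 0) for k in A if k in keep}
  (Ad.keys.foldl (fun r k =>
      if PySem.Set.contains keep k then r.insert k (Ad.getD k 0 - Bd.getD k 0) else r)
    PySem.Dict.empty).items

-- ===== PRECONDITION & SPEC =====
-- Pre_ excludes association lists whose A-side keys repeat: such lists do not represent any
-- Python dict, so the Python function is never called on them.
def Pre_count_dict_difference (A : List (String × Int)) (B : List (String × Int)) : Prop :=
  (A.map Prod.fst).Nodup
instance (A : List (String × Int)) (B : List (String × Int)) : Decidable (Pre_count_dict_difference A B) := by unfold Pre_count_dict_difference; infer_instance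
def pvWitness_count_dict_difference : (List (String × Int)) × (List (String × Int)) :=
  ([("a", 3), ("b", -2), ("c", 5)], [("a", 1), ("c", 9)])
def Spec_count_dict_difference (A : List (String × Int)) (B : List (String × Int)) (out : List (String × Int)) : Prop := out = count_dict_difference_alt A B
instance (A : List (String × Int)) (B : List (String × Int)) (out : List (String × Int)) : Decidable (Spec_count_dict_difference A B out) := by unfold Spec_count_dict_difference; infer_instance

-- ===== CLAIM (what is proved, stated in full; the proofs are below) =====
def Claim_equal_count_dict_difference : Prop := ∀ (A : List (String × Int)) (B : List (String × Int)), Dom_count_dict_difference A B → Pre_count_dict_difference A B → Spec_count_dict_difference A B (count_dict_difference A B)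

-- ===== LEMMAS AND PROOFS =====

-- A conditional-insert loop over pairwise-distinct fresh keys builds exactly the filtered list.
theorem items_foldl_insert_if {α : Type} (l : List α) (c : α → Bool) (k : α → String) (v : α → Int)
    (d : PySem.Dict String Int)
    (hf : ∀ a ∈ l, d.contains (k a) = false)
    (hnd : (l.map k).Nodup) :
    (l.foldl (fun r a => if c a then r.insert (k a) (v a) else r) d).items
      = d.items ++ (l.filter c).map (fun a => (k a, v a)) := by
  induction l generalizing d with
  | nil => simp
  | cons a l ih =>
    simp only [List.map_cons, List.nodup_cons] at hnd
    have hfresh : ∀ b ∈ l, (d.insert (k a) (v a)).contains (k b) = false := by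
      intro b hb
      rw [PySem.Dict.contains_insert]
      have hne : k b ≠ k a := fun h => hnd.1 (h ▸ List.mem_map_of_mem hb)
      simp [hne, hf b (List.mem_cons_of_mem _ hb)]
    by_cases hc : c a
    · rw [List.foldl_cons, if_pos hc, ih _ hfresh hnd.2,
        PySem.Dict.items_insert_of_not_contains _ _ (hf a List.mem_cons_self)]
      simp [hc]
    · rw [List.foldl_cons, if_neg hc, ih _ (fun b hb => hf b (List.mem_cons_of_mem _ hb)) hnd.2]
      simp [hc]

theorem count_eq_alt (A B : List (String × Int)) (hA : (A.map Prod.fst).Nodup) :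
    count_dict_difference A B = count_dict_difference_alt A B := by
  unfold count_dict_difference count_dict_difference_alt
  dsimp only
  have hAnd : (PySem.Dict.mk A).keys.Nodup := by
    simpa [PySem.Dict.keys_mk] using hA
  have hndid : ((PySem.Dict.mk A).keys.map (fun a => a)).Nodup := by
    simpa [List.map_id'] using hAnd
  -- rewrite A's loop body into the uniform conditional-insert shape
  rw [PySem.List.foldl_congr_mem (PySem.Dict.mk A).keys _
      (fun (r : PySem.Dict String Int) (key : String) =>
        if (!(PySem.Dict.mk B).contains key
            || decide ((PySem.Dict.mk A).getD key 0 - (PySem.Dict.mk B).getD key 0 > 0)) then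
          r.insert key ((PySem.Dict.mk A).getD key 0 - (PySem.Dict.mk B).getD key 0)
        else r) _ ?side]
  case side =>
    intro r key _
    dsimp only
    by_cases hb : (PySem.Dict.mk B).contains key = true
    · rw [if_pos hb]
      by_cases hpos : (PySem.Dict.mk A).getD key 0 - (PySem.Dict.mk B).getD key 0 > 0
      · rw [if_pos hpos, if_pos (by simp only [hb, decide_eq_true hpos, Bool.not_true,
          Bool.false_or])]
      · rw [if_neg hpos, if_neg (fun h => by
          simp only [hb, Bool.not_true, Bool.false_or] at h
          exact hpos (of_decide_eq_true h))]
    · have hb' : (PySem.Dict.mk B).contains key = false := Bool.eq_false_iff.mpr hb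
      have h0 : (PySem.Dict.mk B).getD key 0 = 0 :=
        PySem.Dict.getD_of_not_contains _ 0 hb'
      rw [if_neg hb, if_pos (by simp only [hb', Bool.not_false, Bool.true_or]), h0, sub_zero]
  -- flatten both conditional-insert loops over the (distinct) keys of A
  rw [items_foldl_insert_if (PySem.Dict.mk A).keys _ _ _ _
      (fun a _ => PySem.Dict.contains_empty _) hndid,
    items_foldl_insert_if (PySem.Dict.mk A).keys _ _ _ _
      (fun a _ => PySem.Dict.contains_empty _) hndid]
  -- same mapped value on both sides; the two kept-key conditions agree on A's keys
  refine congrArg _ (congrArg (List.map _) (List.filter_congr ?_))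
  intro key hkey
  have hBk : (PySem.Dict.mk B).contains key = true ↔ key ∈ (PySem.Dict.mk B).keys :=
    PySem.Dict.contains_iff_mem_keys _ _
  have hkeep : (PySem.Set.contains
      (PySem.Set.union (PySem.Set.diff (PySem.Set.ofList (PySem.Dict.mk A).keys) (PySem.Dict.mk B).keys)
        (List.filter (fun k => decide ((PySem.Dict.mk A).getD k 0 > (PySem.Dict.mk B).getD k 0))
          (PySem.Set.inter (PySem.Set.ofList (PySem.Dict.mk A).keys) (PySem.Dict.mk B).keys)))
      key) = true ↔
      (key ∉ (PySem.Dict.mk B).keys ∨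
        (key ∈ (PySem.Dict.mk B).keys ∧
          (PySem.Dict.mk A).getD key 0 > (PySem.Dict.mk B).getD key 0)) := by
    rw [PySem.Set.contains_iff, PySem.Set.mem_union, PySem.Set.mem_diff, PySem.Set.mem_ofList]
    constructor
    · rintro (⟨-, h⟩ | h)
      · exact Or.inl h
      · rcases List.mem_filter.mp h with ⟨hs, hpos⟩
        rw [PySem.Set.mem_inter] at hs
        exact Or.inr ⟨hs.2, of_decide_eq_true hpos⟩
    · rintro (h | ⟨hm, hpos⟩)
      · exact Or.inl ⟨hkey, h⟩
      · refine Or.inr (List.mem_filter.mpr ⟨?_, decide_eq_true hpos⟩)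
        rw [PySem.Set.mem_inter, PySem.Set.mem_ofList]
        exact ⟨hkey, hm⟩
  by_cases hb : (PySem.Dict.mk B).contains key = true
  · by_cases hpos : (PySem.Dict.mk A).getD key 0 - (PySem.Dict.mk B).getD key 0 > 0
    · rw [hkeep.mpr (Or.inr ⟨hBk.mp hb, by omega⟩)]
      simp only [hb, decide_eq_true hpos, Bool.not_true, Bool.false_or]
    · have h1 : _ ≠ true := fun h => by
        rcases hkeep.mp h with h' | ⟨-, h'⟩
        · exact h' (hBk.mp hb)
        · omega
      rw [Bool.eq_false_iff.mpr h1]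
      simp only [hb, Bool.not_true, Bool.false_or]
      exact Bool.eq_false_iff.mpr (fun h => hpos (of_decide_eq_true h))
  · have hb' : (PySem.Dict.mk B).contains key = false := Bool.eq_false_iff.mpr hb
    rw [hkeep.mpr (Or.inl (fun h => hb (hBk.mpr h)))]
    simp only [hb', Bool.not_false, Bool.true_or]

-- ===== VERDICT (by name: the statement is the Claim_ definition above) =====
theorem count_dict_difference_spec : Claim_equal_count_dict_difference := by
  intro A B _ hPre
  unfold Spec_count_dict_difference
  exact count_eq_alt A B hPre
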